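-- pv_equiv track=rewrite | github.com/Wang-Shuo/-offer | 剑指offer/020.py | scanDigit
-- ===== SOURCE A (Python) =====
-- def scanDigit(strList):
--     dotNum = 0
--     digitNum = 0
--     digitList = [str(i) for i in range(10)] + ['+', '-', '.']
--
--     for i in range(len(strList)):
--         if strList[i] not in digitList:
--             return False
--         if strList[i] == '.':
--             dotNum += 1
--         if strList[i] in [str(i) for i in range(10)]:
--             digitNum += 1
--         if strList[i] in ['+', '-'] and i != 0:
--             return False
--
--     if dotNum > 1:
--         return False
--     if digitNum == 0:
--         return False
--     return True
-- ===== SOURCE B (Python) =====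
-- def scanDigit(strList):
--     digits = [str(d) for d in range(10)]
--     allowed = digits + ['+', '-', '.']
--     if any(c not in allowed for c in strList):
--         return False
--     if any(c in ('+', '-') for c in strList[1:]):
--         return False
--     if strList.count('.') > 1:
--         return False
--     return any(c in digits for c in strList)
-- ===== Notes on version B (the rewrite author's own statement) =====
-- stated objective: simpler
-- what changed: Replaced the single stateful index-loop (accumulating dot and digit counters with mid-loop early returns) by four independent targeted passes: an allowed-set scan, a sign-position scan over the tail, a '.'-count check, and a digit-presence scan.
import Mathlib
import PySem

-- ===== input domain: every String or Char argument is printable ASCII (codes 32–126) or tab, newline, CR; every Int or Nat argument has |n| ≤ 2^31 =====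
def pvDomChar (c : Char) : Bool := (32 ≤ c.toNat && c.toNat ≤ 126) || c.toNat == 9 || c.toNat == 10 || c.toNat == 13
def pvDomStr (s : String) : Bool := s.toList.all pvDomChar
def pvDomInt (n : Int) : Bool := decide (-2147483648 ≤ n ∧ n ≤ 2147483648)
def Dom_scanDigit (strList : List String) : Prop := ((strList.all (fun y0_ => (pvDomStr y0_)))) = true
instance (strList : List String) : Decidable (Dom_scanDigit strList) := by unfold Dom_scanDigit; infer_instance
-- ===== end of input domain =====

-- B replaces A's single stateful index-loop by four independent targeted passes (objective: simpler).

-- ===== PORT A =====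
-- digitList = [str(i) for i in range(10)] + ['+', '-', '.']
def pvDigits : List String := ["0","1","2","3","4","5","6","7","8","9"]
def pvAllowed : List String := pvDigits ++ ["+", "-", "."]

-- the for-loop over range(len(strList)) with state (i, dotNum, digitNum) and early returns
def scanDigitGo : List String → Nat → Nat → Nat → Bool
  | [], _, dotNum, digitNum =>
    if dotNum > 1 then false
    else if digitNum = 0 then false
    else true
  | s :: rest, i, dotNum, digitNum =>
    if ¬ (pvAllowed.contains s) then false
    else
      let dotNum' := if s = "." then dotNum + 1 else dotNum
      let digitNum' := if pvDigits.contains s then digitNum + 1 else digitNum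
      if (s = "+" ∨ s = "-") ∧ i ≠ 0 then false
      else scanDigitGo rest (i + 1) dotNum' digitNum'

def scanDigit (strList : List String) : Bool :=
  scanDigitGo strList 0 0 0

-- ===== PORT B =====
def scanDigit_alt (strList : List String) : Bool :=
  if strList.any (fun c => ¬ (pvAllowed.contains c)) then false
  else if (strList.drop 1).any (fun c => c = "+" ∨ c = "-") then false
  else if strList.count "." > 1 then false
  else strList.any (fun c => pvDigits.contains c)

-- ===== PRECONDITION & SPEC =====
def Spec_scanDigit (strList : List String) (out : Bool) : Prop := out = scanDigit_alt strList
instance (strList : List String) (out : Bool) : Decidable (Spec_scanDigit strList out) := by unfold Spec_scanDigit; infer_instance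

-- ===== CLAIM (what is proved, stated in full; the proofs are below) =====
def Claim_equal_scanDigit : Prop := ∀ (strList : List String), Dom_scanDigit strList → Spec_scanDigit strList (scanDigit strList)

-- ===== LEMMAS AND PROOFS =====

-- characterisation of A's loop once past index 0: it returns true iff the four
-- independent conditions hold, with counters offset by the accumulated state
lemma scanDigitGo_true_iff (l : List String) (i dotNum digitNum : Nat) (hi : i ≠ 0) :
    scanDigitGo l i dotNum digitNum = true ↔
      ((∀ c ∈ l, c ∈ pvAllowed) ∧ (∀ c ∈ l, ¬(c = "+" ∨ c = "-")) ∧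
       dotNum + l.count "." ≤ 1 ∧
       0 < digitNum + l.countP (fun c => pvDigits.contains c)) := by
  induction l generalizing i dotNum digitNum with
  | nil =>
    simp only [scanDigitGo, List.not_mem_nil, List.count_nil, List.countP_nil]
    split_ifs with h1 h2 <;> simp <;> omega
  | cons s rest ih =>
    by_cases hA : pvAllowed.contains s = true
    · have hmem : s ∈ pvAllowed := by simpa using hA
      by_cases hS : (s = "+" ∨ s = "-") ∧ i ≠ 0
      · have hfalse : scanDigitGo (s :: rest) i dotNum digitNum = false := by
          simp [scanDigitGo, hmem, hS]
        rw [hfalse]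
        simp only [Bool.false_eq_true, false_iff]
        intro h
        exact h.2.1 s (by simp) hS.1
      · have hns : ¬(s = "+" ∨ s = "-") := fun h => hS ⟨h, hi⟩
        have hstep : scanDigitGo (s :: rest) i dotNum digitNum =
            scanDigitGo rest (i + 1) (if s = "." then dotNum + 1 else dotNum)
              (if pvDigits.contains s then digitNum + 1 else digitNum) := by
          simp [scanDigitGo, hmem, hS]
        rw [hstep, ih _ _ _ (by omega)]
        constructor
        · rintro ⟨ha, hb, hc, hd⟩
          refine ⟨?_, ?_, ?_, ?_⟩
          · intro c hc'
            rcases List.mem_cons.mp hc' with rfl | hc'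
            · exact hmem
            · exact ha c hc'
          · intro c hc'
            rcases List.mem_cons.mp hc' with rfl | hc'
            · exact hns
            · exact hb c hc'
          · rw [List.count_cons]
            split_ifs at hc ⊢ <;> simp_all <;> omega
          · rw [List.countP_cons]
            split_ifs at hd ⊢ <;> simp_all <;> omega
        · rintro ⟨ha, hb, hc, hd⟩
          rw [List.count_cons] at hc
          rw [List.countP_cons] at hd
          refine ⟨fun c h => ha c (List.mem_cons_of_mem _ h),
            fun c h => hb c (List.mem_cons_of_mem _ h), ?_, ?_⟩
          · split_ifs at hc ⊢ <;> simp_all <;> omega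
          · split_ifs at hd ⊢ <;> simp_all <;> omega
    · have hmem : s ∉ pvAllowed := by simpa using hA
      have hfalse : scanDigitGo (s :: rest) i dotNum digitNum = false := by
        simp [scanDigitGo, hmem]
      rw [hfalse]
      simp only [Bool.false_eq_true, false_iff]
      intro h
      exact hmem (h.1 s (by simp))

-- B returns true iff the same four conditions
lemma scanDigit_alt_true_iff (l : List String) :
    scanDigit_alt l = true ↔
      ((∀ c ∈ l, c ∈ pvAllowed) ∧ (∀ c ∈ l.drop 1, ¬(c = "+" ∨ c = "-")) ∧
       l.count "." ≤ 1 ∧ ∃ c ∈ l, pvDigits.contains c = true) := by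
  unfold scanDigit_alt
  split_ifs with h1 h2 h3
  · simp only [List.any_eq_true, decide_eq_true_eq] at h1
    simp only [false_iff]
    intro h
    obtain ⟨c, hc, hc'⟩ := h1
    exact hc' (by simpa using h.1 c hc)
  · simp only [List.any_eq_true, decide_eq_true_eq] at h2
    simp only [false_iff]
    intro h
    obtain ⟨c, hc, hc'⟩ := h2
    exact h.2.1 c hc hc'
  · simp only [false_iff]
    intro h
    exact absurd h.2.2.1 (by omega)
  · simp only [List.any_eq_true, decide_eq_true_eq] at h1 h2 ⊢
    push_neg at h1 h2
    constructor
    · rintro ⟨c, hc, hc'⟩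
      refine ⟨?_, ?_, by omega, ⟨c, hc, hc'⟩⟩
      · intro c hc
        simpa using h1 c hc
      · intro c hc
        have := h2 c hc
        tauto
    · rintro ⟨_, _, _, hd⟩
      exact hd

-- ===== VERDICT (by name: the statement is the Claim_ definition above) =====
theorem scanDigit_spec : Claim_equal_scanDigit := by
  intro strList _
  unfold Spec_scanDigit
  rw [Bool.eq_iff_iff, scanDigit_alt_true_iff]
  cases strList with
  | nil =>
    simp [scanDigit, scanDigitGo]
  | cons s rest =>
    by_cases hA : pvAllowed.contains s = true
    · have hmem : s ∈ pvAllowed := by simpa using hA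
      have hstep : scanDigit (s :: rest) =
          scanDigitGo rest 1 (if s = "." then 1 else 0)
            (if pvDigits.contains s then 1 else 0) := by
        simp [scanDigit, scanDigitGo, hmem]
      rw [hstep, scanDigitGo_true_iff _ _ _ _ (by omega)]
      constructor
      · rintro ⟨ha, hb, hc, hd⟩
        refine ⟨?_, by simpa using hb, ?_, ?_⟩
        · intro c hc'
          rcases List.mem_cons.mp hc' with rfl | hc'
          · exact hmem
          · exact ha c hc'
        · rw [List.count_cons]
          split_ifs at hc ⊢ <;> simp_all <;> omega
        · by_cases hdig : pvDigits.contains s = true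
          · exact ⟨s, List.mem_cons_self, hdig⟩
          · rw [if_neg hdig] at hd
            have hd' : 0 < List.countP (fun c => pvDigits.contains c) rest := by
              simpa using hd
            obtain ⟨c, hc', hp⟩ := List.countP_pos_iff.mp hd'
            exact ⟨c, List.mem_cons_of_mem _ hc', hp⟩
      · rintro ⟨ha, hb, hc, hd⟩
        rw [List.count_cons] at hc
        refine ⟨fun c h => ha c (List.mem_cons_of_mem _ h), by simpa using hb, ?_, ?_⟩
        · split_ifs at hc ⊢ <;> simp_all <;> omega
        · obtain ⟨c, hc', hp⟩ := hd
          rcases List.mem_cons.mp hc' with rfl | hc'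
          · rw [if_pos hp]
            omega
          · have hpos : 0 < List.countP (fun c => pvDigits.contains c) rest :=
              List.countP_pos_iff.mpr ⟨c, hc', hp⟩
            exact Nat.lt_of_lt_of_le hpos (Nat.le_add_left _ _)
    · have hmem : s ∉ pvAllowed := by simpa using hA
      have hfalse : scanDigit (s :: rest) = false := by
        simp [scanDigit, scanDigitGo, hmem]
      rw [hfalse]
      simp only [Bool.false_eq_true, false_iff]
      intro h
      exact hmem (h.1 s (by simp))
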